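-- pv_equiv track=rewrite | github.com/Oxford-LINKS-NLP/clinical_notes_ICD9 | preprocess/tokenizer/tokenizer_utils.py | erase_spans
-- ===== SOURCE A (Python) =====
-- def erase_spans(report, span_list):
-- 	"""
-- 	Erase all report chars bounded by each [start, end) span.
-- 	"""
--
-- 	if len(span_list) > 0:
-- 		prev_end = 0
-- 		new_report = ''
-- 		for span in span_list:
-- 			start = span[0]
-- 			end   = span[1]
-- 			new_report += report[prev_end:start]
-- 			prev_end = end
-- 		new_report += report[prev_end:]
-- 		report = new_report
--
-- 	return report
-- ===== SOURCE B (Python) =====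
-- def erase_spans(report, span_list):
--     """
--     Erase all report chars bounded by each [start, end) span.
--     Back-to-front: pop spans off the end, prepending each kept piece.
--     """
--     if not span_list:
--         return report
--     spans = list(span_list)
--     start, end = spans.pop()
--     out = report[end:]
--     while spans:
--         nstart, nend = spans.pop()
--         out = report[nend:start] + out
--         start = nstart
--     return report[:start] + out
-- ===== Notes on version B (the rewrite author's own statement) =====
-- stated objective: alternative
-- what changed: B builds the result back-to-front: it pops spans off the end of a working copy of the list and PREPENDS each kept piece, threading the next span's start instead of A's forward prev_end/new_report accumulator loop.
import Mathlib
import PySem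

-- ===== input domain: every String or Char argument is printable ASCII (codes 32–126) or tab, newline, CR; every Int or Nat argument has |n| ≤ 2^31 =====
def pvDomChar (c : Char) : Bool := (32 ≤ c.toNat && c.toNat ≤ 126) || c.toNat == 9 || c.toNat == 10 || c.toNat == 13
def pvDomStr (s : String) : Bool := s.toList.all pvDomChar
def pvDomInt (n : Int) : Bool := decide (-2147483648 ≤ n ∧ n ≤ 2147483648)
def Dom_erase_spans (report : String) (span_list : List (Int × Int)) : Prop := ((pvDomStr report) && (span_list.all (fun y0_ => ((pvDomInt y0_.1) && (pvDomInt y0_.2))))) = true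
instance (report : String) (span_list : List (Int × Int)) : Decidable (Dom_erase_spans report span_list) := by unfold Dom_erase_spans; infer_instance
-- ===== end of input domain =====

-- B builds the result BACK-TO-FRONT: it pops spans off the end and prepends each kept
-- piece, threading the next span's start — instead of A's forward prev_end accumulator
-- loop (alternative decomposition, same value; no speed claim).

-- ===== PORT A =====
-- literal transliteration of A: guarded forward loop threading (prev_end, new_report), then the tail slice
def erase_spans (report : String) (span_list : List (Int × Int)) : String :=
  if span_list.length > 0 then
    let st := span_list.foldl
      (fun (p : Int × List Char) span =>
        (span.2, p.2 ++ PySem.List.slice report.toList (some p.1) (some span.1)))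
      ((0 : Int), ([] : List Char))
    String.mk (st.2 ++ PySem.List.slice report.toList (some st.1) none)
  else report

-- ===== PORT B =====
-- literal transliteration of B: pop from the end of the span list (= structural walk over
-- its reverse), prepending each kept piece report[nend:start], then the head piece report[:start]
def erase_spans_alt (report : String) (span_list : List (Int × Int)) : String :=
  match span_list.reverse with
  | [] => report
  | (start, «end») :: spans =>
    let cs := report.toList
    let st := spans.foldl
      (fun (p : Int × List Char) sp =>
        (sp.1, PySem.List.slice cs (some sp.2) (some p.1) ++ p.2))
      (start, PySem.List.slice cs (some «end») none)
    String.mk (PySem.List.slice cs none (some st.1) ++ st.2)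

-- ===== PRECONDITION & SPEC =====
def Spec_erase_spans (report : String) (span_list : List (Int × Int)) (out : String) : Prop := out = erase_spans_alt report span_list
instance (report : String) (span_list : List (Int × Int)) (out : String) : Decidable (Spec_erase_spans report span_list out) := by unfold Spec_erase_spans; infer_instance

-- ===== CLAIM =====
def Claim_equal_erase_spans : Prop := ∀ (report : String) (span_list : List (Int × Int)), Dom_erase_spans report span_list → Spec_erase_spans report span_list (erase_spans report span_list)

-- ===== LEMMAS AND PROOFS =====

-- kept text of the spans in l between left bound a? and right bound b?
def keepB (cs : List Char) (a? : Option Int) (l : List (Int × Int)) (b? : Option Int) : List Char :=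
  match l with
  | [] => PySem.List.slice cs a? b?
  | (s, e) :: t => PySem.List.slice cs a? (some s) ++ keepB cs (some e) t b?

lemma keepB_snoc (cs : List Char) (a? : Option Int) (l : List (Int × Int)) (x : Int × Int)
    (b? : Option Int) :
    keepB cs a? (l ++ [x]) b? = keepB cs a? l (some x.1) ++ PySem.List.slice cs (some x.2) b? := by
  induction l generalizing a? with
  | nil => simp [keepB]
  | cons hd tl ih => simp [keepB, ih, List.append_assoc]

lemma keepB_zero (cs : List Char) (l : List (Int × Int)) (b? : Option Int) :
    keepB cs (some 0) l b? = keepB cs none l b? := by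
  cases l <;> simp [keepB]

-- A's loop invariant: the fold-then-tail-slice equals acc ++ kept text from prev = p
lemma loopA_eq (cs : List Char) :
    ∀ (l : List (Int × Int)) (p : Int) (acc : List Char),
      (l.foldl
        (fun (q : Int × List Char) span =>
          (span.2, q.2 ++ PySem.List.slice cs (some q.1) (some span.1))) (p, acc)).2
        ++ PySem.List.slice cs
            (some (l.foldl
              (fun (q : Int × List Char) span =>
                (span.2, q.2 ++ PySem.List.slice cs (some q.1) (some span.1))) (p, acc)).1) none
      = acc ++ keepB cs (some p) l none := by
  intro l
  induction l with
  | nil => intro p acc; simp [keepB]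
  | cons hd tl ih =>
    intro p acc
    simp only [List.foldl_cons]
    rw [ih hd.2 (acc ++ PySem.List.slice cs (some p) (some hd.1))]
    simp [keepB, List.append_assoc]

-- B's loop invariant: consuming rl (spans in reverse order) with state (start, out)
-- and finishing with report[:start] yields keepB … ++ out
lemma loopB_eq (cs : List Char) :
    ∀ (l : List (Int × Int)) (start : Int) (out : List Char),
      (let st := l.reverse.foldl
          (fun (p : Int × List Char) sp =>
            (sp.1, PySem.List.slice cs (some sp.2) (some p.1) ++ p.2)) (start, out)
       PySem.List.slice cs none (some st.1) ++ st.2)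
      = keepB cs none l (some start) ++ out := by
  intro l
  induction l using List.reverseRecOn with
  | nil => intro start out; simp [keepB]
  | append_singleton l x ih =>
    intro start out
    simp only [List.reverse_append, List.reverse_singleton, List.singleton_append,
      List.foldl_cons]
    rw [ih x.1 (PySem.List.slice cs (some x.2) (some start) ++ out)]
    rw [keepB_snoc]
    simp [List.append_assoc]

theorem erase_spans_spec : Claim_equal_erase_spans := by
  intro report span_list _
  unfold Spec_erase_spans erase_spans erase_spans_alt
  cases h : span_list.reverse with
  | nil =>
    have : span_list = [] := by simpa using congrArg List.reverse h
    subst this; simp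
  | cons hd tl =>
    have hsl : span_list = tl.reverse ++ [hd] := by
      have := congrArg List.reverse h
      simpa using this
    subst hsl
    have hlen : (tl.reverse ++ [hd]).length > 0 := by simp
    rw [if_pos hlen]
    dsimp only
    rw [loopA_eq report.toList (tl.reverse ++ [hd]) 0 []]
    have hb := loopB_eq report.toList tl.reverse hd.1
      (PySem.List.slice report.toList (some hd.2) none)
    simp only [List.reverse_reverse] at hb
    rw [hb, keepB_snoc, keepB_zero]
    simp
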